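-- pv_equiv track=rewrite | github.com/Nurullah649/NPC-AI | f221220013_Nurullah_Kurnaz_Odev31.py | generate_language_with_duplicates
-- ===== SOURCE A (Python) =====
-- from collections import Counter
--
-- def generate_language_with_duplicates(rules, start_symbol='S'):
--     """CFG'ye göre tüm dili üretir ve tekrar eden kelimeleri tespit eder."""
--     all_strings = []
--     queue = [start_symbol]
--
--     while queue:
--         current = queue.pop()
--         if all(char.islower() for char in current):  # Tüm karakterler terminalse
--             all_strings.append(current)
--         else:
--             for i, char in enumerate(current):
--                 if char.isupper() and char in rules:  # Değiştirilebilir bir sembolse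
--                     for replacement in rules[char]:
--                         new_string = current[:i] + replacement + current[i + 1:]
--                         queue.append(new_string)
--
--     counter = Counter(all_strings)
--     unique_results = sorted(set(all_strings))
--     duplicates = sorted([word for word, count in counter.items() if count > 1])
--     return unique_results, duplicates
-- ===== SOURCE B (Python) =====
-- def generate_language_with_duplicates(rules, start_symbol='S'):
--     """CFG language via recursive derivation-tree expansion; duplicates via a hand-built count dict."""
--     def expand(cur):
--         children = [cur[:i] + rep + cur[i + 1:]
--                     for i, ch in enumerate(cur)
--                     if ch.isupper() and ch in rules
--                     for rep in rules[ch]]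
--         if not children:
--             return [cur] if all(c.islower() for c in cur) else []
--         out = []
--         for child in children:
--             out.extend(expand(child))
--         return out
--
--     all_strings = expand(start_symbol)
--     counts = {}
--     for w in all_strings:
--         counts[w] = counts.get(w, 0) + 1
--     unique_results = sorted(counts)
--     duplicates = sorted(w for w in counts if counts[w] > 1)
--     return unique_results, duplicates
-- ===== Notes on version B (the rewrite author's own statement) =====
-- stated objective: alternative
-- what changed: Replaces the explicit LIFO work-queue loop with a recursive derivation-tree expansion (expand returns the terminal strings derivable from a sentential form), and replaces Counter/set reporting with one hand-built count dict whose sorted keys give the unique words and whose >1 entries give the duplicates.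
import Mathlib
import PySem

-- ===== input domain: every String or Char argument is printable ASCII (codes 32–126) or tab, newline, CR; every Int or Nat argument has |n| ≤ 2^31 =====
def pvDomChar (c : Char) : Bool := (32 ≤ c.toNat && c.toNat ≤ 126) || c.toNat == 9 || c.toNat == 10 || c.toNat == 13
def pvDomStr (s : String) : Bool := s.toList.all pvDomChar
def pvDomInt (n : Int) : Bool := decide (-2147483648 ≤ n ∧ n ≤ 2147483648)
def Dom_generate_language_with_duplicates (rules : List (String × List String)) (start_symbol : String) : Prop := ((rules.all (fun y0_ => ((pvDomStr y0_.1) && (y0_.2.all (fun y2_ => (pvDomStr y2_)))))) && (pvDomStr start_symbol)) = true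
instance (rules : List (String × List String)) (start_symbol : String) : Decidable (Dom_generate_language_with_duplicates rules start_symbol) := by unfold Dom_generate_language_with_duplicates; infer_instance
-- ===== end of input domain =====

-- B re-implements the same CFG enumeration by recursive derivation-tree expansion with a hand-built
-- count dict, instead of A's explicit LIFO work-queue loop with Counter/set reporting (alternative
-- decomposition, same cost); proved equal on every grammar on which A's loop terminates (Pre_).

-- shared small helpers: the "replaceable symbol" test and the rule lookup
def pvRepl (rules : List (String × List String)) (c : Char) : Bool :=
  PySem.Chars.isupper c && PySem.Dict.contains (PySem.Dict.mk rules) (String.ofList [c])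

def pvSubs (rules : List (String × List String)) (c : Char) : List String :=
  PySem.Dict.getD (PySem.Dict.mk rules) (String.ofList [c]) []

-- the replaceable symbols occurring in the replacements of a symbol (the grammar's dependency graph)
def pvSyms (rules : List (String × List String)) (c : Char) : List Char :=
  ((pvSubs rules c).flatMap String.toList).filter (pvRepl rules)

-- longest-derivation-depth rank of a symbol, computed to the given fuel
def pvRankF (rules : List (String × List String)) : Nat → Char → Nat
  | 0, _ => 0
  | f + 1, c => 1 + ((pvSyms rules c).map (fun d => pvRankF rules f d)).foldr max 0

def pvRank (rules : List (String × List String)) (c : Char) : Nat :=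
  pvRankF rules (rules.length + 1) c

-- size bounds of the grammar and the weight measure the termination argument uses
def pvMaxRepl (rules : List (String × List String)) : Nat :=
  rules.foldl (fun m p => max m p.2.length) 0

def pvMaxLen (rules : List (String × List String)) : Nat :=
  rules.foldl (fun m p => p.2.foldl (fun m r => max m r.toList.length) m) 0

def pvB (rules : List (String × List String)) : Nat := pvMaxLen rules + 1

def pvWtC (rules : List (String × List String)) (c : Char) : Nat :=
  if pvRepl rules c then (pvB rules) ^ (pvRank rules c + 1) else 0

def pvWt (rules : List (String × List String)) (cs : List Char) : Nat :=
  (cs.map (pvWtC rules)).sum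

-- every replaceable symbol in the string has a stabilized (cycle-free) rank
def pvGood (rules : List (String × List String)) (cs : List Char) : Bool :=
  cs.all (fun c => !pvRepl rules c || decide (pvRank rules c ≤ rules.length))

def pvW (R k : Nat) : Nat := (R + 1) ^ k * k.factorial

-- ===== PORT A =====
-- the inner double loop "for i, char in enumerate(current): … for replacement in rules[char]: queue.append(…)"
def pvChildrenA (rules : List (String × List String)) (cs : List Char) : List (List Char) :=
  (PySem.List.enumerate cs 0).foldl (fun acc p =>
    if pvRepl rules p.2 then
      acc ++ (pvSubs rules p.2).map
        (fun r => PySem.List.slice cs none (some p.1) ++ r.toList ++ PySem.List.slice cs (some (p.1 + 1)) none)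
    else acc) []

-- the while-queue loop; the queue is a stack with its top at the list head (so the freshly
-- appended children arrive reversed, exactly like Python's queue.pop())
def pvLoopA (rules : List (String × List String)) : Nat → List (List Char) → List (List Char) → List (List Char)
  | 0, _, acc => acc
  | _ + 1, [], acc => acc
  | fuel + 1, cur :: q, acc =>
    if cur.all PySem.Chars.islower then pvLoopA rules fuel q (acc ++ [cur])
    else pvLoopA rules fuel ((pvChildrenA rules cur).reverse ++ q) acc

def generate_language_with_duplicates (rules : List (String × List String)) (start_symbol : String) : List String × List String :=
  let all_strings := (pvLoopA rules (pvW (pvMaxRepl rules) (pvWt rules start_symbol.toList)) [start_symbol.toList] []).map String.ofList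
  let counter := PySem.Dict.counter all_strings
  let unique_results := PySem.List.sorted (PySem.Set.ofList all_strings) (fun x => x)
  let duplicates := PySem.List.sorted (counter.items.foldl (fun l p => if p.2 > 1 then l ++ [p.1] else l) []) (fun x => x)
  (unique_results, duplicates)

-- ===== PORT B =====
-- Source B's child comprehension: filter the replaceable positions, then splice in each replacement
def pvChildrenB (rules : List (String × List String)) (cs : List Char) : List (List Char) :=
  (cs.zipIdx.filter (fun p => pvRepl rules p.1)).flatMap
    (fun p => (pvSubs rules p.1).map (fun r => cs.take p.2 ++ r.toList ++ cs.drop (p.2 + 1)))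

-- Source B's recursive expand
def pvExpand (rules : List (String × List String)) : Nat → List Char → List (List Char)
  | fuel, cur =>
    if (pvChildrenB rules cur).isEmpty then
      if cur.all PySem.Chars.islower then [cur] else []
    else
      match fuel with
      | 0 => []
      | fuel + 1 => (pvChildrenB rules cur).flatMap (fun c => pvExpand rules fuel c)

def generate_language_with_duplicates_alt (rules : List (String × List String)) (start_symbol : String) : List String × List String :=
  let all_strings := (pvExpand rules (pvWt rules start_symbol.toList) start_symbol.toList).map String.ofList
  let counts := all_strings.foldl (fun d w => d.insert w (d.getD w 0 + 1)) (PySem.Dict.empty : PySem.Dict String Int)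
  (PySem.List.sorted counts.keys (fun x => x),
   PySem.List.sorted (counts.keys.foldl (fun l w => if counts.getD w 0 > 1 then l ++ [w] else l) []) (fun x => x))

-- ===== PRECONDITION & SPEC =====
-- Pre_ excludes (a) grammars in which a rewrite cycle is reachable from start_symbol — exactly the
-- inputs on which A's work loop never terminates (it returns on every other input) — stated as a
-- decidable condition on the grammar's nonterminal DEPENDENCY GRAPH (edges pvSyms), not on either
-- port's computation: for each replaceable symbol of start_symbol the longest dependency-chain
-- length pvRank, evaluated to depth |rules|+1, is still ≤ |rules|; a cycle-free symbol's chains are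
-- ≤ |rules| long, while a symbol reaching a cycle has chains of every length, so the bound holds
-- precisely on the cycle-free (terminating) grammars; and (b) rule lists with duplicate keys, a
-- corner a Python dict cannot even represent (last occurrence wins there, while the
-- association-list reading is first-match).
def Pre_generate_language_with_duplicates (rules : List (String × List String)) (start_symbol : String) : Prop :=
  pvGood rules start_symbol.toList = true ∧ (rules.map Prod.fst).Nodup
instance (rules : List (String × List String)) (start_symbol : String) : Decidable (Pre_generate_language_with_duplicates rules start_symbol) := by unfold Pre_generate_language_with_duplicates; infer_instance

def pvWitness_generate_language_with_duplicates : (List (String × List String)) × String :=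
  ([("S", ["aT", "b", "aT"]), ("T", ["b", "bb"])], "SaT")

def Spec_generate_language_with_duplicates (rules : List (String × List String)) (start_symbol : String) (out : List String × List String) : Prop := out = generate_language_with_duplicates_alt rules start_symbol
instance (rules : List (String × List String)) (start_symbol : String) (out : List String × List String) : Decidable (Spec_generate_language_with_duplicates rules start_symbol out) := by unfold Spec_generate_language_with_duplicates; infer_instance

-- ===== CLAIM (what is proved, stated in full; the proofs are below) =====
def Claim_equal_generate_language_with_duplicates : Prop := ∀ (rules : List (String × List String)) (start_symbol : String), Dom_generate_language_with_duplicates rules start_symbol → Pre_generate_language_with_duplicates rules start_symbol → Spec_generate_language_with_duplicates rules start_symbol (generate_language_with_duplicates rules start_symbol)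

-- ===== LEMMAS AND PROOFS =====

lemma pv_flatMap_filter {α β : Type} (p : α → Bool) (g : α → List β) (l : List α) :
    (l.filter p).flatMap g = l.flatMap (fun x => if p x then g x else []) := by
  induction l with
  | nil => rfl
  | cons x t ih => by_cases h : p x <;> simp [h, ih]

-- the two child computations produce the same list
lemma pv_children_eq (rules : List (String × List String)) (cs : List Char) :
    pvChildrenA rules cs = pvChildrenB rules cs := by
  unfold pvChildrenA pvChildrenB
  rw [PySem.List.enumerate_eq_zipIdx_map, List.foldl_map]
  rw [PySem.List.foldl_congr_mem _ _
      (fun acc p => acc ++ (if pvRepl rules p.1 then (pvSubs rules p.1).map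
        (fun r => cs.take p.2 ++ r.toList ++ cs.drop (p.2 + 1)) else [])) _ ?_]
  · rw [PySem.List.foldl_append_eq_flatMap, List.nil_append, pv_flatMap_filter]
  · intro acc x hx
    by_cases h : pvRepl rules x.1
    · simp only [h, if_true]
      congr 1
      apply List.map_congr_left
      intro r _
      have h1 : ((0:ℤ) + (x.2:ℤ)).toNat = x.2 := by omega
      have h2 : ((0:ℤ) + (x.2:ℤ) + 1).toNat = x.2 + 1 := by omega
      rw [PySem.List.slice_to _ (by positivity), PySem.List.slice_from _ (by positivity), h1, h2]
    · simp [h]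

-- ---- rank machinery: the rank of a cycle-free symbol stabilizes, and children rank strictly lower

lemma pv_le_foldr_max {x : Nat} {l : List Nat} (h : x ∈ l) : x ≤ l.foldr max 0 := by
  induction l with
  | nil => simp at h
  | cons y t ih =>
    rcases List.mem_cons.mp h with rfl | h
    · exact le_max_left _ _
    · exact le_trans (ih h) (le_max_right _ _)

lemma pv_rankF_pos (rules : List (String × List String)) (f : Nat) (c : Char) :
    1 ≤ pvRankF rules (f + 1) c := by
  unfold pvRankF; omega

lemma pv_stab (rules : List (String × List String)) :
    ∀ (f : Nat) (c : Char), pvRankF rules (f + 1) c ≤ f → pvRankF rules (f + 2) c = pvRankF rules (f + 1) c := by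
  intro f
  induction f with
  | zero =>
    intro c h
    exact absurd (pv_rankF_pos rules 0 c) (by omega)
  | succ f ih =>
    intro c h
    show pvRankF rules (f + 3) c = pvRankF rules (f + 2) c
    have hu : pvRankF rules (f + 3) c
        = 1 + ((pvSyms rules c).map (fun d => pvRankF rules (f + 2) d)).foldr max 0 := rfl
    have hv : pvRankF rules (f + 2) c
        = 1 + ((pvSyms rules c).map (fun d => pvRankF rules (f + 1) d)).foldr max 0 := rfl
    rw [hu, hv]
    congr 1
    apply congrArg
    apply List.map_congr_left
    intro d hd
    apply ih
    have hmem : pvRankF rules (f + 1) d ∈ (pvSyms rules c).map (fun d => pvRankF rules (f + 1) d) :=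
      List.mem_map_of_mem hd
    have := pv_le_foldr_max hmem
    rw [hv] at h
    omega

lemma pv_stab_ge (rules : List (String × List String)) (f : Nat) (c : Char)
    (h : pvRankF rules (f + 1) c ≤ f) :
    ∀ k, pvRankF rules (f + 1 + k) c = pvRankF rules (f + 1) c := by
  intro k
  induction k with
  | zero => rfl
  | succ k ih =>
    have h2 : pvRankF rules (f + k + 1) c ≤ f + k := by
      have : f + 1 + k = f + k + 1 := by omega
      rw [← this, ih]; omega
    have := pv_stab rules (f + k) c h2
    have he : f + 1 + (k + 1) = f + k + 2 := by omega
    rw [he, this]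
    have : f + k + 1 = f + 1 + k := by omega
    rw [this, ih]

-- a child of a stabilized symbol has strictly smaller, stabilized rank
lemma pv_syms_rank (rules : List (String × List String)) {c d : Char}
    (hc : pvRank rules c ≤ rules.length) (hd : d ∈ pvSyms rules c) :
    pvRank rules d + 1 ≤ pvRank rules c ∧ pvRank rules d + 1 ≤ rules.length := by
  have hu : pvRank rules c = 1 + ((pvSyms rules c).map (fun d => pvRankF rules rules.length d)).foldr max 0 := rfl
  have hmem : pvRankF rules rules.length d ∈ (pvSyms rules c).map (fun d => pvRankF rules rules.length d) :=
    List.mem_map_of_mem hd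
  have hle := pv_le_foldr_max hmem
  have hnpos : 1 ≤ rules.length := by
    by_contra h
    have h0 : rules.length = 0 := by omega
    have h1 := pv_rankF_pos rules rules.length c
    unfold pvRank at hc
    omega
  obtain ⟨m, hm⟩ : ∃ m, rules.length = m + 1 := ⟨rules.length - 1, by omega⟩
  have hdn : pvRankF rules (m + 1) d ≤ m := by rw [← hm]; omega
  have hstab := pv_stab_ge rules m d hdn 1
  have hrd : pvRank rules d = pvRankF rules rules.length d := by
    unfold pvRank
    rw [hm]
    simpa using hstab
  constructor
  · omega
  · omega

-- ---- membership facts about pvSubs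

lemma pv_subs_mem {rules : List (String × List String)} {c : Char} {r : String}
    (hr : r ∈ pvSubs rules c) :
    ∃ v, (String.ofList [c], v) ∈ rules ∧ r ∈ v := by
  unfold pvSubs PySem.Dict.getD at hr
  rcases hg : PySem.Dict.get? (PySem.Dict.mk rules) (String.ofList [c]) with _ | v
  · rw [hg] at hr; simp at hr
  · rw [hg] at hr
    have hmem := PySem.Dict.mem_items_of_get?_eq_some _ hg
    exact ⟨v, hmem, by simpa using hr⟩

lemma pv_foldl_max_ge (l : List (String × List String)) :
    ∀ (init : Nat), init ≤ l.foldl (fun m p => max m p.2.length) init ∧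
      ∀ p ∈ l, p.2.length ≤ l.foldl (fun m p => max m p.2.length) init := by
  induction l with
  | nil => intro init; exact ⟨le_refl _, by simp⟩
  | cons x t ih =>
    intro init
    obtain ⟨h1, h2⟩ := ih (max init x.2.length)
    refine ⟨le_trans (le_max_left _ _) h1, ?_⟩
    intro p hp
    rcases List.mem_cons.mp hp with rfl | hp
    · exact le_trans (le_max_right _ _) h1
    · exact h2 p hp

lemma pv_subs_len_le (rules : List (String × List String)) (c : Char) :
    (pvSubs rules c).length ≤ pvMaxRepl rules := by
  unfold pvSubs PySem.Dict.getD
  rcases hg : PySem.Dict.get? (PySem.Dict.mk rules) (String.ofList [c]) with _ | v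
  · simp
  · have hmem := PySem.Dict.mem_items_of_get?_eq_some _ hg
    simpa using (pv_foldl_max_ge rules 0).2 _ hmem

lemma pv_foldl_len_inner (l : List String) :
    ∀ (init : Nat), init ≤ l.foldl (fun m r => max m r.toList.length) init ∧
      ∀ r ∈ l, r.toList.length ≤ l.foldl (fun m r => max m r.toList.length) init := by
  induction l with
  | nil => intro init; exact ⟨le_refl _, by simp⟩
  | cons x t ih =>
    intro init
    obtain ⟨h1, h2⟩ := ih (max init x.toList.length)
    refine ⟨le_trans (le_max_left _ _) h1, ?_⟩
    intro r hr
    rcases List.mem_cons.mp hr with rfl | hr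
    · exact le_trans (le_max_right _ _) h1
    · exact h2 r hr

lemma pv_foldl_len_outer (l : List (String × List String)) :
    ∀ (init : Nat), init ≤ l.foldl (fun m p => p.2.foldl (fun m r => max m r.toList.length) m) init ∧
      ∀ p ∈ l, ∀ r ∈ p.2, r.toList.length ≤ l.foldl (fun m p => p.2.foldl (fun m r => max m r.toList.length) m) init := by
  induction l with
  | nil => intro init; exact ⟨le_refl _, by simp⟩
  | cons x t ih =>
    intro init
    obtain ⟨h1, h2⟩ := ih (x.2.foldl (fun m r => max m r.toList.length) init)
    refine ⟨le_trans (pv_foldl_len_inner x.2 init).1 h1, ?_⟩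
    intro p hp r hr
    rcases List.mem_cons.mp hp with rfl | hp
    · exact le_trans ((pv_foldl_len_inner p.2 init).2 r hr) h1
    · exact h2 p hp r hr

lemma pv_repl_len_le {rules : List (String × List String)} {c : Char} {r : String}
    (hr : r ∈ pvSubs rules c) : r.toList.length ≤ pvMaxLen rules := by
  obtain ⟨v, hv, hrv⟩ := pv_subs_mem hr
  exact (pv_foldl_len_outer rules 0).2 _ hv r hrv

-- a replaceable char of a replacement of c is a dependency-graph child of c
lemma pv_mem_syms {rules : List (String × List String)} {c x : Char} {r : String}
    (hr : r ∈ pvSubs rules c) (hx : x ∈ r.toList) (hrepl : pvRepl rules x = true) :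
    x ∈ pvSyms rules c := by
  unfold pvSyms
  rw [List.mem_filter]
  exact ⟨List.mem_flatMap.mpr ⟨r, hr, hx⟩, hrepl⟩

lemma pv_sum_map_le {α : Type} (f : α → Nat) (R : Nat) :
    ∀ (l : List α), (∀ x ∈ l, f x ≤ R) → (l.map f).sum ≤ l.length * R := by
  intro l
  induction l with
  | nil => simp
  | cons x t ih =>
    intro h
    simp only [List.map_cons, List.sum_cons, List.length_cons]
    have := ih (fun y hy => h y (List.mem_cons_of_mem _ hy))
    have hx := h x (by simp)
    calc f x + (t.map f).sum ≤ R + t.length * R := Nat.add_le_add hx this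
      _ = (t.length + 1) * R := by ring

lemma pvB_pow_pos (rules : List (String × List String)) (k : Nat) : 0 < (pvB rules) ^ k := by
  have : 0 < pvB rules := Nat.succ_pos _
  positivity

-- the weight of a replacement of a stabilized symbol c is strictly below c's own weight term,
-- and all its replaceable chars are stabilized too
lemma pv_repl_wt_lt {rules : List (String × List String)} {c : Char} {r : String}
    (hc : pvRank rules c ≤ rules.length) (hr : r ∈ pvSubs rules c) :
    pvWt rules r.toList < (pvB rules) ^ (pvRank rules c + 1)
      ∧ ∀ x ∈ r.toList, pvRepl rules x = true → pvRank rules x ≤ rules.length := by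
  have hterm : ∀ x ∈ r.toList, pvWtC rules x ≤ (pvB rules) ^ (pvRank rules c) := by
    intro x hx
    unfold pvWtC
    by_cases hrepl : pvRepl rules x
    · simp only [hrepl, if_true]
      have := (pv_syms_rank rules hc (pv_mem_syms hr hx hrepl)).1
      exact Nat.pow_le_pow_right (by unfold pvB; omega) (by omega)
    · simp [hrepl]
  constructor
  · have h1 : pvWt rules r.toList ≤ r.toList.length * (pvB rules) ^ (pvRank rules c) :=
      pv_sum_map_le _ _ _ hterm
    have h2 : r.toList.length ≤ pvMaxLen rules := pv_repl_len_le hr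
    have h3 : r.toList.length * (pvB rules) ^ (pvRank rules c)
        < (pvB rules) * (pvB rules) ^ (pvRank rules c) := by
      apply Nat.mul_lt_mul_of_lt_of_le
      · unfold pvB; omega
      · exact le_refl _
      · exact pvB_pow_pos rules _
    calc pvWt rules r.toList ≤ r.toList.length * (pvB rules) ^ (pvRank rules c) := h1
      _ < (pvB rules) * (pvB rules) ^ (pvRank rules c) := h3
      _ = (pvB rules) ^ (pvRank rules c + 1) := by ring
  · intro x hx hrepl
    have := (pv_syms_rank rules hc (pv_mem_syms hr hx hrepl)).2
    omega

lemma pv_wt_append (rules : List (String × List String)) (xs ys : List Char) :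
    pvWt rules (xs ++ ys) = pvWt rules xs + pvWt rules ys := by
  unfold pvWt; rw [List.map_append, List.sum_append]

lemma pv_good_append (rules : List (String × List String)) (xs ys : List Char) :
    pvGood rules (xs ++ ys) = (pvGood rules xs && pvGood rules ys) := by
  unfold pvGood; rw [List.all_append]

-- each child of a good sentential form is good and strictly lighter
lemma pv_child_wt {rules : List (String × List String)} {cs c : List Char}
    (hG : pvGood rules cs = true) (hmem : c ∈ pvChildrenB rules cs) :
    pvWt rules c < pvWt rules cs ∧ pvGood rules c = true := by
  unfold pvChildrenB at hmem
  rw [List.mem_flatMap] at hmem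
  obtain ⟨p, hp, hc⟩ := hmem
  rw [List.mem_filter] at hp
  obtain ⟨hz, hrepl⟩ := hp
  rw [List.mem_map] at hc
  obtain ⟨r, hr, rfl⟩ := hc
  obtain ⟨-, hlt, hx⟩ := List.mem_zipIdx hz
  simp only [Nat.zero_add] at hlt
  simp only [Nat.sub_zero] at hx
  have hsplit : cs = cs.take p.2 ++ cs[p.2] :: cs.drop (p.2 + 1) := by
    conv_lhs => rw [← List.take_append_drop p.2 cs]
    rw [List.drop_eq_getElem_cons hlt]
  have hcrank : pvRank rules p.1 ≤ rules.length := by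
    unfold pvGood at hG
    rw [List.all_eq_true] at hG
    have := hG p.1 (by rw [hx]; exact List.getElem_mem _)
    simp only [hrepl, Bool.not_true, Bool.false_or, decide_eq_true_eq] at this
    exact this
  obtain ⟨hwlt, hgood⟩ := pv_repl_wt_lt hcrank hr
  constructor
  · have e1 : pvWt rules (cs.take p.2 ++ r.toList ++ cs.drop (p.2 + 1))
        = pvWt rules (cs.take p.2) + pvWt rules r.toList + pvWt rules (cs.drop (p.2 + 1)) := by
      rw [pv_wt_append, pv_wt_append]
    have ecell : ∀ (a : Char) (l : List Char), pvWt rules (a :: l) = pvWtC rules a + pvWt rules l := by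
      intro a l; simp [pvWt]
    have e2 : pvWt rules cs
        = pvWt rules (cs.take p.2) + (pvWtC rules cs[p.2] + pvWt rules (cs.drop (p.2 + 1))) := by
      conv_lhs => rw [hsplit]
      rw [pv_wt_append, ecell]
    have hwc : pvWtC rules cs[p.2] = (pvB rules) ^ (pvRank rules p.1 + 1) := by
      unfold pvWtC
      rw [← hx]
      simp [hrepl]
    rw [e1, e2, hwc]
    omega
  · rw [pv_good_append, pv_good_append]
    have hG' : ∀ x ∈ cs, (!pvRepl rules x || decide (pvRank rules x ≤ rules.length)) = true := by
      have h := hG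
      unfold pvGood at h
      rw [List.all_eq_true] at h
      exact h
    have hGparts : pvGood rules (cs.take p.2) = true ∧ pvGood rules (cs.drop (p.2 + 1)) = true := by
      constructor
      · unfold pvGood
        rw [List.all_eq_true]
        exact fun x hx => hG' x (List.mem_of_mem_take hx)
      · unfold pvGood
        rw [List.all_eq_true]
        exact fun x hx => hG' x (List.mem_of_mem_drop hx)
    have hGr : pvGood rules r.toList = true := by
      unfold pvGood
      rw [List.all_eq_true]
      intro x hx
      by_cases hrx : pvRepl rules x
      · simp [hrx, hgood x hx hrx]
      · simp [hrx]
    rw [hGparts.1, hGparts.2, hGr]; rfl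

lemma pv_children_ne_nil {rules : List (String × List String)} {cs : List Char}
    (h : pvChildrenB rules cs ≠ []) : 0 < pvWt rules cs := by
  obtain ⟨c, hc⟩ := List.exists_mem_of_ne_nil _ h
  unfold pvChildrenB at hc
  rw [List.mem_flatMap] at hc
  obtain ⟨p, hp, -⟩ := hc
  rw [List.mem_filter] at hp
  obtain ⟨hz, hrepl⟩ := hp
  have hx : p.1 ∈ cs := by
    obtain ⟨-, hlt, hx⟩ := List.mem_zipIdx (by simpa using hz)
    simp only [Nat.zero_add] at hlt
    rw [hx]; exact List.getElem_mem _
  have h1 : pvWtC rules p.1 ∈ cs.map (pvWtC rules) := List.mem_map_of_mem hx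
  have h2 : 1 ≤ pvWtC rules p.1 := by
    unfold pvWtC
    simp only [hrepl, if_true]
    exact pvB_pow_pos rules _
  exact lt_of_lt_of_le h2 (List.single_le_sum (by simp) _ h1)

lemma pv_lower_not_repl {rules : List (String × List String)} {c : Char}
    (h : PySem.Chars.islower c = true) : pvRepl rules c = false := by
  unfold pvRepl
  suffices hs : PySem.Chars.isupper c = false by simp [hs]
  unfold PySem.Chars.islower at h
  unfold PySem.Chars.isupper
  simp only [Bool.and_eq_true, decide_eq_true_eq] at h
  simp only [Bool.and_eq_false_iff, decide_eq_false_iff_not, not_le]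
  right
  calc ('Z' : Char) < 'a' := by decide
    _ ≤ c := h.1

lemma pv_children_of_lower {rules : List (String × List String)} {cs : List Char}
    (h : cs.all PySem.Chars.islower = true) : pvChildrenB rules cs = [] := by
  unfold pvChildrenB
  rw [List.all_eq_true] at h
  have : cs.zipIdx.filter (fun p => pvRepl rules p.1) = [] := by
    rw [List.filter_eq_nil_iff]
    intro p hp
    have hx : p.1 ∈ cs := by
      rcases p with ⟨x, i⟩
      obtain ⟨-, hlt, hx⟩ := List.mem_zipIdx hp
      simp only [Nat.zero_add] at hlt
      rw [hx]; exact List.getElem_mem _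
    simp [pv_lower_not_repl (h _ hx)]
  rw [this]; rfl

-- fuel irrelevance for expand: any fuel above the weight computes the same list
lemma pv_expand_fuel (rules : List (String × List String)) :
    ∀ (f g : Nat) (cs : List Char), pvGood rules cs = true → pvWt rules cs ≤ f → pvWt rules cs ≤ g →
      pvExpand rules f cs = pvExpand rules g cs := by
  intro f
  induction f with
  | zero =>
    intro g cs hG hf hg
    unfold pvExpand
    by_cases he : (pvChildrenB rules cs).isEmpty
    · simp [he]
    · exact absurd (pv_children_ne_nil (by simpa [List.isEmpty_iff] using he)) (by omega)
  | succ f ih =>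
    intro g cs hG hf hg
    unfold pvExpand
    by_cases he : (pvChildrenB rules cs).isEmpty
    · simp [he]
    · have hpos : 0 < pvWt rules cs := pv_children_ne_nil (by simpa [List.isEmpty_iff] using he)
      match g, hg with
      | 0, hg => exact absurd hg (by omega)
      | g + 1, hg =>
        simp only [he, Bool.false_eq_true, if_false]
        apply List.flatMap_congr
        intro c hc
        obtain ⟨hwlt, hGc⟩ := pv_child_wt hG hc
        exact ih g c hGc (by omega) (by omega)

-- the canonical expansion of one sentential form
def pvE (rules : List (String × List String)) (cs : List Char) : List (List Char) :=
  pvExpand rules (pvWt rules cs) cs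

lemma pv_E_base {rules : List (String × List String)} {cs : List Char}
    (h : pvChildrenB rules cs = []) :
    pvE rules cs = if cs.all PySem.Chars.islower then [cs] else [] := by
  unfold pvE pvExpand
  simp [h]

lemma pv_E_children {rules : List (String × List String)} {cs : List Char}
    (hG : pvGood rules cs = true) (h : pvChildrenB rules cs ≠ []) :
    pvE rules cs = (pvChildrenB rules cs).flatMap (pvE rules) := by
  have hpos : 0 < pvWt rules cs := pv_children_ne_nil h
  unfold pvE
  obtain ⟨k, hk⟩ : ∃ k, pvWt rules cs = k + 1 := ⟨pvWt rules cs - 1, by omega⟩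
  rw [hk]
  conv_lhs => rw [pvExpand]
  have he : (pvChildrenB rules cs).isEmpty = false := by simpa [List.isEmpty_iff] using h
  rw [if_neg (by simp [he])]
  apply List.flatMap_congr
  intro c hc
  obtain ⟨hwlt, hGc⟩ := pv_child_wt hG hc
  exact pv_expand_fuel rules k (pvWt rules c) c hGc (by omega) le_rfl

-- replaceable positions are no more numerous than the weight
lemma pv_countP_le_wt (rules : List (String × List String)) (cs : List Char) :
    cs.countP (pvRepl rules) ≤ pvWt rules cs := by
  induction cs with
  | nil => simp [pvWt]
  | cons c t ih =>
    have hw : pvWt rules (c :: t) = pvWtC rules c + pvWt rules t := by simp [pvWt]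
    rw [List.countP_cons, hw]
    by_cases h : pvRepl rules c
    · have h1 : 1 ≤ pvWtC rules c := by
        unfold pvWtC; simp only [h, if_true]; exact pvB_pow_pos rules _
      rw [if_pos h]
      omega
    · rw [if_neg h]
      omega

lemma pv_countP_zipIdx (rules : List (String × List String)) (l : List Char) :
    ∀ k, (l.zipIdx k).countP (fun p => pvRepl rules p.1) = l.countP (pvRepl rules) := by
  induction l with
  | nil => intro k; rfl
  | cons x t ih => intro k; simp [List.zipIdx_cons, List.countP_cons, ih]

lemma pv_children_len_le (rules : List (String × List String)) (cs : List Char) :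
    (pvChildrenB rules cs).length ≤ pvWt rules cs * pvMaxRepl rules := by
  unfold pvChildrenB
  rw [List.length_flatMap]
  have h1 : ((cs.zipIdx.filter (fun p => pvRepl rules p.1)).map
      (fun p => ((pvSubs rules p.1).map (fun r => cs.take p.2 ++ r.toList ++ cs.drop (p.2 + 1))).length)).sum
      ≤ (cs.zipIdx.filter (fun p => pvRepl rules p.1)).length * pvMaxRepl rules := by
    apply pv_sum_map_le
    intro p _
    simpa using pv_subs_len_le rules p.1
  refine le_trans h1 ?_
  rw [← List.countP_eq_length_filter, pv_countP_zipIdx]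
  exact Nat.mul_le_mul_right _ (pv_countP_le_wt rules cs)

lemma pvW_pos (R k : Nat) : 0 < pvW R k := by
  unfold pvW
  exact Nat.mul_pos (by positivity) k.factorial_pos

lemma pvW_mono (R : Nat) {k m : Nat} (h : k ≤ m) : pvW R k ≤ pvW R m := by
  unfold pvW
  exact Nat.mul_le_mul (Nat.pow_le_pow_right (Nat.succ_le_succ (Nat.zero_le R)) h) (Nat.factorial_le h)

lemma pvW_step (R k : Nat) : (k + 1) * R * pvW R k < pvW R (k + 1) := by
  unfold pvW
  rw [pow_succ, Nat.factorial_succ]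
  have h1 : 0 < (R + 1) ^ k := by positivity
  have h2 : 0 < k.factorial := k.factorial_pos
  nlinarith [h1, h2, Nat.mul_pos h1 h2]

-- the termination measure of A's work queue
def pvMu (rules : List (String × List String)) (q : List (List Char)) : Nat :=
  (q.map (fun s => pvW (pvMaxRepl rules) (pvWt rules s))).sum

-- A's work-queue loop produces a permutation of the concatenated canonical expansions
lemma pv_loop_perm (rules : List (String × List String)) :
    ∀ (fuel : Nat) (q acc : List (List Char)), (∀ s ∈ q, pvGood rules s = true) → pvMu rules q ≤ fuel →
      (pvLoopA rules fuel q acc).Perm (acc ++ q.flatMap (pvE rules)) := by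
  intro fuel
  induction fuel with
  | zero =>
    intro q acc hG hmu
    match q with
    | [] => simp [pvLoopA]
    | cur :: t =>
      exfalso
      have := pvW_pos (pvMaxRepl rules) (pvWt rules cur)
      simp [pvMu] at hmu
      omega
  | succ fuel ih =>
    intro q acc hG hmu
    match q with
    | [] => simp [pvLoopA]
    | cur :: t =>
      have hGcur : pvGood rules cur = true := hG cur (by simp)
      have hGt : ∀ s ∈ t, pvGood rules s = true := fun s hs => hG s (List.mem_cons_of_mem _ hs)
      have hmu' : pvW (pvMaxRepl rules) (pvWt rules cur) + pvMu rules t ≤ fuel + 1 := by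
        simpa [pvMu] using hmu
      have hwpos := pvW_pos (pvMaxRepl rules) (pvWt rules cur)
      rw [pvLoopA]
      by_cases hlow : cur.all PySem.Chars.islower
      · simp only [hlow, if_true]
        have h1 := ih t (acc ++ [cur]) hGt (by omega)
        have hE : pvE rules cur = [cur] := by
          rw [pv_E_base (pv_children_of_lower hlow)]
          simp [hlow]
        refine h1.trans (List.Perm.of_eq ?_)
        simp [hE]
      · rw [if_neg (by simp [hlow])]
        rw [pv_children_eq]
        by_cases hch : pvChildrenB rules cur = []
        · have h1 := ih t acc hGt (by omega)
          rw [hch]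
          have hE : pvE rules cur = [] := by
            rw [pv_E_base hch]
            simp [hlow]
          refine List.Perm.trans (by simpa using h1) (List.Perm.of_eq ?_)
          simp [hE]
        · -- children nonempty: the measure strictly decreases
          have hpos : 0 < pvWt rules cur := pv_children_ne_nil hch
          obtain ⟨k, hk⟩ : ∃ k, pvWt rules cur = k + 1 := ⟨pvWt rules cur - 1, by omega⟩
          have hmuch : pvMu rules (pvChildrenB rules cur) + 1 ≤ pvW (pvMaxRepl rules) (pvWt rules cur) := by
            have hterm : ∀ c ∈ pvChildrenB rules cur,
                pvW (pvMaxRepl rules) (pvWt rules c) ≤ pvW (pvMaxRepl rules) k := by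
              intro c hc
              have := (pv_child_wt hGcur hc).1
              exact pvW_mono _ (by omega)
            have hsum := pv_sum_map_le (fun s => pvW (pvMaxRepl rules) (pvWt rules s))
              (pvW (pvMaxRepl rules) k) (pvChildrenB rules cur) hterm
            have hlen := pv_children_len_le rules cur
            have hmul : (pvChildrenB rules cur).length * pvW (pvMaxRepl rules) k
                ≤ (k + 1) * pvMaxRepl rules * pvW (pvMaxRepl rules) k := by
              apply Nat.mul_le_mul_right
              rw [hk] at hlen
              exact hlen
            have hstep := pvW_step (pvMaxRepl rules) k
            rw [hk]
            unfold pvMu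
            omega
          have hmunew : pvMu rules ((pvChildrenB rules cur).reverse ++ t) ≤ fuel := by
            have : pvMu rules ((pvChildrenB rules cur).reverse ++ t)
                = pvMu rules (pvChildrenB rules cur) + pvMu rules t := by
              unfold pvMu
              rw [List.map_append, List.sum_append, List.map_reverse, List.sum_reverse]
            omega
          have hGnew : ∀ s ∈ (pvChildrenB rules cur).reverse ++ t, pvGood rules s = true := by
            intro s hs
            rcases List.mem_append.mp hs with hs | hs
            · exact (pv_child_wt hGcur (List.mem_reverse.mp hs)).2
            · exact hGt s hs
          have h1 := ih ((pvChildrenB rules cur).reverse ++ t) acc hGnew hmunew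
          refine h1.trans ?_
          rw [List.flatMap_append, List.flatMap_cons]
          rw [pv_E_children hGcur hch]
          apply List.Perm.append_left
          apply List.Perm.append_right
          exact (List.reverse_perm _).flatMap (fun a _ => List.Perm.refl _)

-- the two comprehension-style duplicate folds as filters
lemma pv_fold_if1 (items : List (String × Int)) :
    items.foldl (fun l p => if p.2 > 1 then l ++ [p.1] else l) []
      = (items.filter (fun p => decide ((1:Int) < p.2))).map Prod.fst := by
  have : (fun (l : List String) (p : String × Int) => if p.2 > 1 then l ++ [p.1] else l)
      = (fun l p => if (decide ((1:Int) < p.2)) = true then l ++ [Prod.fst p] else l) := by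
    funext l p; simp
  rw [this, PySem.List.foldl_append_if, List.nil_append]

lemma pv_fold_if2 (cnt : PySem.Dict String Int) (keys : List String) :
    keys.foldl (fun l w => if cnt.getD w 0 > 1 then l ++ [w] else l) []
      = (keys.filter (fun w => decide ((1:Int) < cnt.getD w 0))).map (fun x => x) := by
  have : (fun (l : List String) (w : String) => if cnt.getD w 0 > 1 then l ++ [w] else l)
      = (fun l w => if (decide ((1:Int) < cnt.getD w 0)) = true then l ++ [(fun x => x) w] else l) := by
    funext l w; simp
  rw [this, PySem.List.foldl_append_if, List.nil_append]

-- the two reporting halves agree on permuted multisets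
lemma pv_report_eq {xs ys : List String} (h : xs.Perm ys) :
    (PySem.List.sorted (PySem.Set.ofList xs) (fun x => x),
     PySem.List.sorted ((PySem.Dict.counter xs).items.foldl (fun l p => if p.2 > 1 then l ++ [p.1] else l) []) (fun x => x))
    = (let counts := ys.foldl (fun d w => d.insert w (d.getD w 0 + 1)) (PySem.Dict.empty : PySem.Dict String Int)
       (PySem.List.sorted counts.keys (fun x => x),
        PySem.List.sorted (counts.keys.foldl (fun l w => if counts.getD w 0 > 1 then l ++ [w] else l) []) (fun x => x))) := by
  have hc : (ys.foldl (fun d w => d.insert w (d.getD w 0 + 1)) (PySem.Dict.empty : PySem.Dict String Int))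
      = PySem.Dict.counter ys := PySem.Dict.foldl_insert_getD_add_one_eq_counter ys
  rw [hc]
  simp only [PySem.Dict.keys_counter]
  have hperm : (PySem.Set.ofList xs).Perm (PySem.Set.ofList ys) := by
    rw [List.perm_ext_iff_of_nodup (PySem.Set.nodup_ofList xs) (PySem.Set.nodup_ofList ys)]
    intro a
    simp [PySem.Set.mem_ofList, h.mem_iff]
  refine Prod.ext ?_ ?_
  · exact PySem.List.sorted_eq_sorted_of_perm _ _ _ (fun a b hab => hab) hperm
  · rw [pv_fold_if1, pv_fold_if2 (PySem.Dict.counter ys) (PySem.Set.ofList ys)]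
    simp only [PySem.Dict.items_counter, List.filter_map, List.map_map, List.map_id']
    have hcnt : (fun w => decide ((1:Int) < (PySem.Dict.counter ys).getD w 0))
        = fun w => decide ((1:Int) < (List.count w xs : Int)) := by
      funext w
      rw [PySem.Dict.getD_counter, h.count_eq]
    rw [hcnt]
    have hpred : ((fun (p : String × Int) => decide ((1:Int) < p.2)) ∘ (fun k => (k, (List.count k xs : Int))))
        = fun k => decide ((1:Int) < (List.count k xs : Int)) := rfl
    rw [hpred]
    have hmapfst : (Prod.fst ∘ (fun (k : String) => (k, (List.count k xs : Int)))) = id := rfl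
    rw [hmapfst, List.map_id]
    exact PySem.List.sorted_eq_sorted_of_perm _ _ _ (fun a b hab => hab) (hperm.filter _)

-- ===== VERDICT (by name: the statement is the Claim_ definition above) =====
theorem generate_language_with_duplicates_spec : Claim_equal_generate_language_with_duplicates := by
  intro rules start _hD hPre
  obtain ⟨hG, -⟩ := hPre
  unfold Spec_generate_language_with_duplicates
  unfold generate_language_with_duplicates generate_language_with_duplicates_alt
  have hloop := pv_loop_perm rules (pvW (pvMaxRepl rules) (pvWt rules start.toList)) [start.toList] []
    (by intro s hs; rw [List.mem_singleton] at hs; rw [hs]; exact hG)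
    (by simp only [pvMu, List.map_cons, List.map_nil, List.sum_cons, List.sum_nil, Nat.add_zero]; exact le_rfl)
  simp only [List.flatMap_cons, List.flatMap_nil, List.append_nil, List.nil_append] at hloop
  have hB : pvExpand rules (pvWt rules start.toList) start.toList = pvE rules start.toList := rfl
  rw [hB]
  exact pv_report_eq (hloop.map String.ofList)
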